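-- pv_equiv track=rewrite | github.com/bvddw/python | python basics/codewars/cw_Insert Dashes 2.py | insert_dash2
-- ===== SOURCE A (Python) =====
-- def insert_dash2(num):
--     num = str(num)  # перетворюємо число на рядок для зручності
--     modified_num = num[0]
--     odd = '13579'  # рядок тільки з непарних чисел
--     even = '2468'  # рядок тільки з парних чисел (0 сюди не відноситься за умовою)
--     for i in range(len(num) - 1):  # ідемо по рядку
--         if num[i] in odd and num[i + 1] in odd:  # додаємо тире, якщо поруч стоять два непарних числа
--             modified_num += '-'
--         elif num[i] in even and num[i + 1] in even:  # додаємо *, якщо поруч стоять два парних числа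
--             modified_num += '*'
--         modified_num += num[i + 1]
--     return modified_num
-- ===== SOURCE B (Python) =====
-- def _sep(s, cls, ch):
--     out = []
--     prev = None
--     for c in s:
--         if prev is not None and prev in cls and c in cls:
--             out.append(ch)
--         out.append(c)
--         prev = c
--     return ''.join(out)
--
-- def insert_dash2(num):
--     s = str(num)
--     return _sep(_sep(s, '13579', '-'), '2468', '*')
-- ===== Notes on version B (the rewrite author's own statement) =====
-- stated objective: alternative
-- what changed: Replaces A's single indexed loop with if/elif over num[i],num[i+1] by two independent separator passes: one pass inserts '-' between adjacent odd digits, a second pass inserts '*' between adjacent even digits of that result.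
import Mathlib
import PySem

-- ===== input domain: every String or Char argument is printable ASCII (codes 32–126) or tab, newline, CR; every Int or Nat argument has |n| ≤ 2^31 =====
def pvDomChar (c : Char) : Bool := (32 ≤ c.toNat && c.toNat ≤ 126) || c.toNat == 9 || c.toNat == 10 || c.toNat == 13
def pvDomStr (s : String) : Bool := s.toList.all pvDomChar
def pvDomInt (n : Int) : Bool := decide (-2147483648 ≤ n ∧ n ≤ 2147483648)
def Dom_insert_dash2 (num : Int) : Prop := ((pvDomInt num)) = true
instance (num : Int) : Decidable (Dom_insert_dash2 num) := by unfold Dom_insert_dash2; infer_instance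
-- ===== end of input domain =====

-- B replaces A's single indexed loop (if/elif on each adjacent pair) by two independent
-- separator passes: insert '-' between adjacent odd digits, then '*' between adjacent evens.

-- ===== PORT A =====
def pvOdd : List Char := ['1','3','5','7','9']
def pvEven : List Char := ['2','4','6','8']

-- the for-loop of A: prev = num[i], walks the tail (num[i+1] = head of rest), acc = modified_num
def pvLoopA (prev : Char) (rest : List Char) (acc : List Char) : List Char :=
  match rest with
  | [] => acc
  | c :: t =>
    let acc' := if prev ∈ pvOdd ∧ c ∈ pvOdd then acc ++ ['-']
                else if prev ∈ pvEven ∧ c ∈ pvEven then acc ++ ['*'] else acc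
    pvLoopA c t (acc' ++ [c])

def insert_dash2 (num : Int) : String :=
  match (PySem.Int.toStr num).toList with
  | [] => ""   -- unreachable: str(int) is never empty, so num[0] never raises
  | c :: t => String.ofList (pvLoopA c t [c])

-- ===== PORT B =====
-- _sep: one pass over s with state (out, prev); prev = None before the first char
def pvSep (cls : List Char) (ch : Char) (s : List Char) : List Char :=
  (s.foldl (fun (st : List Char × Option Char) c =>
      let out := if (match st.2 with | some p => decide (p ∈ cls ∧ c ∈ cls) | none => false)
                 then st.1 ++ [ch, c] else st.1 ++ [c]
      (out, some c)) ([], none)).1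

def insert_dash2_alt (num : Int) : String :=
  String.ofList (pvSep ['2','4','6','8'] '*' (pvSep ['1','3','5','7','9'] '-' (PySem.Int.toStr num).toList))

-- ===== PRECONDITION & SPEC =====
def Spec_insert_dash2 (num : Int) (out : String) : Prop := out = insert_dash2_alt num
instance (num : Int) (out : String) : Decidable (Spec_insert_dash2 num out) := by unfold Spec_insert_dash2; infer_instance

-- ===== CLAIM (what is proved, stated in full; the proofs are below) =====
def Claim_equal_insert_dash2 : Prop := ∀ (num : Int), Dom_insert_dash2 num → Spec_insert_dash2 num (insert_dash2 num)

-- ===== LEMMAS AND PROOFS =====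

-- difference list produced by A's loop after the first char
def pvF (prev : Char) (rest : List Char) : List Char :=
  match rest with
  | [] => []
  | c :: t =>
    (if prev ∈ pvOdd ∧ c ∈ pvOdd then ['-']
     else if prev ∈ pvEven ∧ c ∈ pvEven then ['*'] else []) ++ c :: pvF c t

-- difference list produced by one _sep pass after the first char
def pvG (cls : List Char) (ch : Char) (prev : Char) (rest : List Char) : List Char :=
  match rest with
  | [] => []
  | c :: t => (if prev ∈ cls ∧ c ∈ cls then [ch] else []) ++ c :: pvG cls ch c t

theorem pvLoopA_eq (rest : List Char) : ∀ prev acc, pvLoopA prev rest acc = acc ++ pvF prev rest := by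
  induction rest with
  | nil => intro prev acc; simp [pvLoopA, pvF]
  | cons c t ih =>
    intro prev acc
    simp only [pvLoopA, pvF]
    rw [ih]
    split_ifs <;> simp

theorem pvSep_fold_eq (cls : List Char) (ch : Char) (rest : List Char) :
    ∀ prev acc, (rest.foldl (fun (st : List Char × Option Char) c =>
      let out := if (match st.2 with | some p => decide (p ∈ cls ∧ c ∈ cls) | none => false)
                 then st.1 ++ [ch, c] else st.1 ++ [c]
      (out, some c)) (acc, some prev)).1 = acc ++ pvG cls ch prev rest := by
  induction rest with
  | nil => intro prev acc; simp [pvG]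
  | cons c t ih =>
    intro prev acc
    simp only [List.foldl, pvG]
    rw [ih]
    by_cases h : prev ∈ cls ∧ c ∈ cls <;> simp [h]

theorem pvSep_eq (cls : List Char) (ch : Char) : ∀ s : List Char,
    pvSep cls ch s = match s with | [] => [] | c :: t => c :: pvG cls ch c t := by
  intro s
  cases s with
  | nil => rfl
  | cons c t =>
    have := pvSep_fold_eq cls ch t c [c]
    simpa [pvSep] using this

theorem odd_not_even {c : Char} (h : c ∈ pvOdd) : c ∉ pvEven := by
  simp [pvOdd] at h
  rcases h with h|h|h|h|h <;> subst h <;> decide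

-- the second pass over the first pass's output equals A's combined pass
theorem pvG_comp (t : List Char) : ∀ prev,
    pvG pvEven '*' prev (pvG pvOdd '-' prev t) = pvF prev t := by
  induction t with
  | nil => intro prev; rfl
  | cons c t ih =>
    intro prev
    by_cases h : prev ∈ pvOdd ∧ c ∈ pvOdd
    · have hd : ¬ ('-' ∈ pvEven) := by decide
      have hc : c ∉ pvEven := odd_not_even h.2
      simp [pvG, pvF, h, hd, hc, ih c]
    · by_cases h2 : prev ∈ pvEven ∧ c ∈ pvEven
      · simp [pvG, pvF, h, h2, ih c]
      · simp [pvG, pvF, h, h2, ih c]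

-- ===== VERDICT (by name: the statement is the Claim_ definition above) =====
theorem insert_dash2_spec : Claim_equal_insert_dash2 := by
  intro num _
  unfold Spec_insert_dash2 insert_dash2 insert_dash2_alt
  cases hs : (PySem.Int.toStr num).toList with
  | nil => rfl
  | cons c t =>
    show String.ofList (pvLoopA c t [c]) =
      String.ofList (pvSep ['2','4','6','8'] '*' (pvSep ['1','3','5','7','9'] '-' (c :: t)))
    rw [pvLoopA_eq, pvSep_eq, pvSep_eq]
    show String.ofList ([c] ++ pvF c t) = String.ofList (c :: pvG pvEven '*' c (pvG pvOdd '-' c t))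
    rw [pvG_comp]
    rfl
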